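-- pv_equiv track=rewrite | github.com/foxscotch/advent-of-code | 2015/day-08/p2.py | get_diff
-- ===== SOURCE A (Python) =====
-- def get_diff(s):
--     lines = s.split('\n')
--     code_len = 0
--     enc_len = 0
--
--     for line in lines:
--         code_len += len(line)
--
--         step = 0
--         while step < len(line):
--             if line[step] is '\\' or line[step] is '"':
--                enc_len += 2
--             else:
--                 enc_len += 1
--             step += 1
--
--         enc_len += 2
--
--     return enc_len, code_len, enc_len - code_len
-- ===== SOURCE B (Python) =====
-- def get_diff(s):
--     numlines = s.count('\n') + 1
--     code_len = len(s) - (numlines - 1)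
--     enc_len = code_len + s.count('\\') + s.count('"') + 2 * numlines
--     return enc_len, code_len, enc_len - code_len
-- ===== Notes on version B (the rewrite author's own statement) =====
-- stated objective: faster
-- what changed: Replaces the per-line loop with its index-by-index character scan by closed-form whole-string arithmetic over three str.count passes ('\n', '\\', '"') and len(s), with no explicit loops.
import Mathlib
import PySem

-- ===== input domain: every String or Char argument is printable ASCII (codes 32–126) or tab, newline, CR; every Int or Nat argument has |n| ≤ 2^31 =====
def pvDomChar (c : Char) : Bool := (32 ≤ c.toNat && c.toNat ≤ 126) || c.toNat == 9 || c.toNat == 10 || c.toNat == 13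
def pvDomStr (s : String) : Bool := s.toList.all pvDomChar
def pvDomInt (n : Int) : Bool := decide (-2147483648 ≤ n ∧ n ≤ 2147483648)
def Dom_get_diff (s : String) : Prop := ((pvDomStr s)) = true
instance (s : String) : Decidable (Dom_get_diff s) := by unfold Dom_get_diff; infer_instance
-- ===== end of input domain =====

-- B replaces A's per-line loop with nested character scan by whole-string counting arithmetic (objective: faster; a timing run measured B ≥ 1.5× faster).


-- ===== PORT A =====
-- the 'while step < len(line)' loop of A (the comparison `line[step] is '\\'` is char
-- equality on interned one-char ASCII strings; the loop guard keeps the index in range,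
-- so line[step] is plain in-range indexing)
def encLoop (ln : List Char) (step : Nat) (enc : Int) : Int :=
  if h : step < ln.length then
    encLoop ln (step + 1) (enc + (if (ln[step] = '\\' ∨ ln[step] = '"') then 2 else 1))
  else enc
termination_by ln.length - step

def get_diff (s : String) : Int × Int × Int :=
  let lines := PySem.Chars.splitOn s.toList ['\n']
  let r := lines.foldl (fun (st : Int × Int) ln =>
      let code_len := st.1 + (ln.length : Int)
      let enc_len := encLoop ln 0 st.2
      (code_len, enc_len + 2)) ((0 : Int), (0 : Int))
  (r.2, r.1, r.2 - r.1)

-- ===== PORT B =====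
def get_diff_alt (s : String) : Int × Int × Int :=
  let numlines : Int := (PySem.Str.count s "\n" : Int) + 1
  let code_len : Int := (PySem.Str.len s : Int) - (numlines - 1)
  let enc_len : Int := code_len + (PySem.Str.count s "\\" : Int) + (PySem.Str.count s "\"" : Int) + 2 * numlines
  (enc_len, code_len, enc_len - code_len)

-- ===== PRECONDITION & SPEC =====
def Spec_get_diff (s : String) (out : Int × Int × Int) : Prop := out = get_diff_alt s
instance (s : String) (out : Int × Int × Int) : Decidable (Spec_get_diff s out) := by unfold Spec_get_diff; infer_instance

-- ===== CLAIM (what is proved, stated in full; the proofs are below) =====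
def Claim_equal_get_diff : Prop := ∀ (s : String), Dom_get_diff s → Spec_get_diff s (get_diff s)

-- ===== LEMMAS AND PROOFS =====

-- reference splitter: split a char list at every occurrence of c (empty pieces kept)
def consH (x : Char) : List (List Char) → List (List Char)
  | [] => [[x]]
  | h :: t => (x :: h) :: t

def spl (c : Char) : List Char → List (List Char)
  | [] => [[]]
  | x :: xs => if x = c then [] :: spl c xs else consH x (spl c xs)

-- prepend a prefix onto the first piece
def preH (p : List Char) : List (List Char) → List (List Char)
  | [] => [p]
  | h :: t => (p ++ h) :: t

lemma spl_ne_nil (c : Char) (l : List Char) : spl c l ≠ [] := by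
  cases l with
  | nil => simp [spl]
  | cons x xs =>
    simp only [spl]
    split
    · simp
    · cases h : spl c xs <;> simp [consH]

lemma splitOn_go_eq (c : Char) :
    ∀ (fuel : Nat) (l cur : List Char) (acc : List (List Char)),
      l.length ≤ fuel →
      PySem.Chars.splitOn.go [c] fuel l cur acc = acc.reverse ++ preH cur.reverse (spl c l) := by
  intro fuel
  induction fuel with
  | zero =>
    intro l cur acc hl
    have : l = [] := by cases l <;> simp_all
    subst this
    simp [PySem.Chars.splitOn.go, spl, preH]
  | succ n ih =>
    intro l cur acc hl
    cases l with
    | nil => simp [PySem.Chars.splitOn.go, spl, preH]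
    | cons x rest =>
      rw [PySem.Chars.splitOn.go]
      simp only [List.length_cons] at hl
      by_cases hx : x = c
      · subst hx
        have hpre : List.isPrefixOf [x] (x :: rest) = true := by simp [List.isPrefixOf]
        rw [if_pos hpre]
        simp only [List.length_cons, List.length_nil, List.drop_succ_cons, List.drop_zero]
        rw [ih rest [] (cur.reverse :: acc) (by omega)]
        simp only [spl]
        cases h : spl x rest with
        | nil => exact absurd h (spl_ne_nil x rest)
        | cons h0 t => simp [preH]
      · have hpre : List.isPrefixOf [c] (x :: rest) = false := by
          simp [List.isPrefixOf]
          exact fun h => hx h.symm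
        rw [if_neg (by simp [hpre])]
        rw [ih rest (x :: cur) acc (by omega)]
        simp only [spl, if_neg hx]
        cases h : spl c rest with
        | nil => exact absurd h (spl_ne_nil c rest)
        | cons h0 t => simp [preH, consH]

lemma splitOn_eq_spl (c : Char) (l : List Char) :
    PySem.Chars.splitOn l [c] = spl c l := by
  rw [PySem.Chars.splitOn, splitOn_go_eq c (l.length + 1) l [] [] (Nat.le_succ _)]
  cases h : spl c l with
  | nil => exact absurd h (spl_ne_nil c l)
  | cons h0 t => simp [preH]

lemma length_spl (c : Char) (l : List Char) :
    (spl c l).length = l.count c + 1 := by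
  induction l with
  | nil => simp [spl]
  | cons x xs ih =>
    simp only [spl]
    by_cases hx : x = c
    · subst hx; simp [ih]
    · rw [if_neg hx]
      cases h : spl c xs with
      | nil => exact absurd h (spl_ne_nil c xs)
      | cons h0 t =>
        have := ih; rw [h] at this
        simp_all [consH]

lemma sum_len_spl (c : Char) (l : List Char) :
    ((spl c l).map List.length).sum + l.count c = l.length := by
  induction l with
  | nil => simp [spl]
  | cons x xs ih =>
    simp only [spl]
    by_cases hx : x = c
    · subst hx; simp at *; omega
    · rw [if_neg hx]
      cases h : spl c xs with
      | nil => exact absurd h (spl_ne_nil c xs)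
      | cons h0 t =>
        rw [h] at ih
        simp [consH, hx] at *
        omega

lemma sum_count_spl (c d : Char) (hd : d ≠ c) (l : List Char) :
    ((spl c l).map (fun p => p.count d)).sum = l.count d := by
  induction l with
  | nil => simp [spl]
  | cons x xs ih =>
    simp only [spl]
    by_cases hx : x = c
    · subst hx
      have hxd : ¬ x = d := fun h => hd h.symm
      simp [hxd, ih]
    · rw [if_neg hx]
      cases h : spl c xs with
      | nil => exact absurd h (spl_ne_nil c xs)
      | cons h0 t =>
        rw [h] at ih
        simp [consH, List.count_cons] at *
        omega

-- the per-character weight of A's inner loop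
def wChar (ch : Char) : Int := if ch = '\\' ∨ ch = '"' then 2 else 1

lemma encLoop_eq_aux : ∀ (n : Nat) (ln : List Char) (step : Nat) (e : Int),
    ln.length ≤ step + n →
    encLoop ln step e = e + ((ln.drop step).map wChar).sum := by
  intro n
  induction n with
  | zero =>
    intro ln step e h
    rw [encLoop, dif_neg (by omega), List.drop_eq_nil_of_le (by omega)]
    simp
  | succ n ih =>
    intro ln step e h
    rw [encLoop]
    by_cases hs : step < ln.length
    · rw [dif_pos hs]
      rw [ih ln (step + 1) _ (by omega)]
      rw [List.drop_eq_getElem_cons hs]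
      simp only [List.map_cons, List.sum_cons, wChar]
      ring
    · rw [dif_neg hs, List.drop_eq_nil_of_le (by omega)]
      simp

lemma encLoop_eq (ln : List Char) (e : Int) :
    encLoop ln 0 e = e + (ln.map wChar).sum := by
  simpa using encLoop_eq_aux ln.length ln 0 e (by omega)

lemma mapw_sum (l : List Char) :
    (l.map wChar).sum = (l.length : Int) + l.count '\\' + l.count '"' := by
  induction l with
  | nil => simp
  | cons x xs ih =>
    simp only [List.map_cons, List.sum_cons, List.count_cons, ih, List.length_cons]
    by_cases h1 : x = '\\'
    · subst h1; simp [wChar]; ring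
    · by_cases h2 : x = '"'
      · subst h2; simp [wChar, h1]; ring
      · simp [wChar, h1, h2]
        ring

def lineEnc (l : List Char) : Int := (l.length : Int) + l.count '\\' + l.count '"' + 2

lemma fold_eq (lines : List (List Char)) : ∀ (c0 e0 : Int),
    lines.foldl (fun (st : Int × Int) ln =>
      let code_len := st.1 + (ln.length : Int)
      let enc_len := encLoop ln 0 st.2
      (code_len, enc_len + 2)) (c0, e0)
    = (c0 + (lines.map (fun l => (l.length : Int))).sum, e0 + (lines.map lineEnc).sum) := by
  induction lines with
  | nil => simp
  | cons l ls ih =>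
    intro c0 e0
    simp only [List.foldl_cons, List.map_cons, List.sum_cons]
    rw [ih, encLoop_eq, mapw_sum]
    simp only [Prod.mk.injEq]
    refine ⟨by ring, by simp only [lineEnc]; ring⟩

lemma sum_lineEnc (ps : List (List Char)) :
    (ps.map lineEnc).sum
      = ((ps.map List.length).sum : Int)
        + ((ps.map (fun p => p.count '\\')).sum : Int)
        + ((ps.map (fun p => p.count '"')).sum : Int)
        + 2 * (ps.length : Int) := by
  induction ps with
  | nil => simp
  | cons p ps ih =>
    simp only [List.map_cons, List.sum_cons, List.length_cons, ih, lineEnc]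
    push_cast
    ring

-- count.go on a single-character pattern is List.count
lemma count_go_eq (c : Char) : ∀ (fuel : Nat) (l : List Char) (acc : Nat),
    l.length ≤ fuel →
    PySem.Chars.count.go [c] fuel l acc = acc + l.count c := by
  intro fuel
  induction fuel with
  | zero =>
    intro l acc h
    have : l = [] := by cases l <;> simp_all
    subst this
    simp [PySem.Chars.count.go]
  | succ n ih =>
    intro l acc h
    cases l with
    | nil => simp [PySem.Chars.count.go]
    | cons x rest =>
      rw [PySem.Chars.count.go]
      simp only [List.length_cons] at h
      by_cases hx : c = x
      · subst hx
        have hpre : List.isPrefixOf [c] (c :: rest) = true := by simp [List.isPrefixOf]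
        rw [if_pos hpre]
        simp only [List.length_cons, List.length_nil, List.drop_succ_cons, List.drop_zero]
        rw [ih rest (acc + 1) (by omega)]
        simp
        omega
      · have hpre : List.isPrefixOf [c] (x :: rest) = false := by
          simp [List.isPrefixOf]
          exact hx
        rw [if_neg (by simp [hpre])]
        rw [ih rest acc (by omega)]
        have hx' : ¬ x = c := fun h' => hx h'.symm
        simp [hx']

lemma chars_count_single (c : Char) (l : List Char) :
    PySem.Chars.count l [c] = l.count c := by
  rw [PySem.Chars.count, if_neg (by simp)]
  simpa using count_go_eq c l.length l 0 (le_refl _)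

lemma cast_sum_count (f : List Char → Nat) (ps : List (List Char)) :
    (ps.map (fun p => (f p : Int))).sum = ((ps.map f).sum : Int) := by
  rw [Nat.cast_list_sum, List.map_map]
  rfl

-- ===== VERDICT (by name: the statement is the Claim_ definition above) =====
theorem get_diff_spec : Claim_equal_get_diff := by
  intro s _
  unfold Spec_get_diff get_diff get_diff_alt
  simp only [PySem.Str.count_eq, PySem.Str.len_eq]
  have h1 : ("\n".toList) = ['\n'] := rfl
  have h2 : ("\\".toList) = ['\\'] := rfl
  have h3 : ("\"".toList) = ['"'] := rfl
  rw [h1, h2, h3, chars_count_single, chars_count_single, chars_count_single,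
     splitOn_eq_spl, fold_eq, sum_lineEnc]
  have hcast : ((spl '\n' s.toList).map (fun l => (l.length : Int))).sum
      = (((spl '\n' s.toList).map List.length).sum : Int) := by
    rw [Nat.cast_list_sum, List.map_map]
    rfl
  rw [hcast]
  rw [cast_sum_count (fun p => List.count '\\' p), cast_sum_count (fun p => List.count '"' p)]
  have hlen := sum_len_spl '\n' s.toList
  have hlenspl := length_spl '\n' s.toList
  have hc1 := sum_count_spl '\n' '\\' (by decide) s.toList
  have hc2 := sum_count_spl '\n' '"' (by decide) s.toList
  simp only [Prod.mk.injEq]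
  refine ⟨?_, ?_, ?_⟩ <;> omega
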